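-- pv_equiv track=rewrite | github.com/wyk18703232953/myResearch | codeComplex/data/filteredData/python/linear/python_linear_0119.py | process
-- ===== SOURCE A (Python) =====
-- def process(a):
--     assert len(a) >= 2
--
--     n = len(a)
--     min_ = float('inf')
--
--     for i, (cnt, c) in enumerate(a):
--         if i == 0 or i == n - 1:
--             min_ = min(min_, cnt)
--
--         else:
--             min_ = min(min_, (cnt + 1) // 2)
--
--     b = []
--     for i, (cnt, c) in enumerate(a):
--         if i == 0 or i == n - 1:
--             remain = cnt - min_
--
--         else:
--             remain = cnt - min_ * 2
--
--         if remain <= 0: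
--             continue
--
--         if len(b) == 0 or c != b[-1][1]:
--             b.append([remain, c])
--
--         else:
--             pre_cnt, pre_c = b.pop()
--             b.append([pre_cnt + remain, c])
--
--     return b, min_
-- ===== SOURCE B (Python) =====
-- def process(a):
--     assert len(a) >= 2
--     n = len(a)
--     min_ = min(cnt if i == 0 or i == n - 1 else (cnt + 1) // 2
--                for i, (cnt, _) in enumerate(a))
--     pos = [rc for rc in
--            ((cnt - min_ if i == 0 or i == n - 1 else cnt - min_ * 2, c)
--             for i, (cnt, c) in enumerate(a))
--            if rc[0] > 0]
--     # prefix sums of the positive remainders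
--     pre = [0]
--     s = 0
--     for r, _ in pos:
--         s += r
--         pre.append(s)
--     # group boundaries: indices where a new character run begins
--     starts = [k for k in range(len(pos)) if k == 0 or pos[k - 1][1] != pos[k][1]]
--     ends = starts[1:] + [len(pos)]
--     return [[pre[e] - pre[s0], pos[s0][1]] for s0, e in zip(starts, ends)], min_
-- ===== Notes on version B (the rewrite author's own statement) =====
-- stated objective: alternative
-- what changed: Instead of A's incremental append/pop stack merge, B computes the positive remainders, then a prefix-sum array and the list of run-boundary indices, and emits each output group independently as a difference of two prefix sums; min_ comes from a single min() over a generator.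
import Mathlib
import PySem

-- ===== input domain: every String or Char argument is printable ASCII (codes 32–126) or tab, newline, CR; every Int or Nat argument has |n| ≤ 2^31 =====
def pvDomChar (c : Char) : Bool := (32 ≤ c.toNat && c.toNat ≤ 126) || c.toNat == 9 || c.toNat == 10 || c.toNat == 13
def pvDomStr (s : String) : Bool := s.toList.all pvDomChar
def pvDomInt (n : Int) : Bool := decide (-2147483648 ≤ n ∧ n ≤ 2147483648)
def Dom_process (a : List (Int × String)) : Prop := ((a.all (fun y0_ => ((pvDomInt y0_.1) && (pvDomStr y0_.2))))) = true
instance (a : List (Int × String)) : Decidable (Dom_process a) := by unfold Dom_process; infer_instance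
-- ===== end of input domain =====

-- B replaces A's incremental append/pop stack merge by a staged construction: prefix sums of the
-- positive remainders plus the list of run-boundary indices, each output group being a difference
-- of two prefix sums; same cost, a genuinely different construction of the grouped output.

-- ===== PORT A =====
-- min(min_, x) with min_ : Option Int (none = float('inf'))
def pyMinA : Option Int → Int → Int
  | none, x => x
  | some v, x => min v x

-- one iteration of A's first loop
def aMinStep (n : Int) (m : Option Int) (p : Int × (Int × String)) : Option Int :=
  if p.1 = 0 ∨ p.1 = n - 1 then some (pyMinA m p.2.1)
  else some (pyMinA m (PySem.Int.floordiv (p.2.1 + 1) 2))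

-- one iteration of A's second loop; the Python list b (append / pop at the END) is
-- kept REVERSED here, so append = cons, b[-1] = head, pop = tail; reversed at return.
def aStep (n m : Int) (b : List (Int × String)) (p : Int × (Int × String)) : List (Int × String) :=
  let remain := if p.1 = 0 ∨ p.1 = n - 1 then p.2.1 - m else p.2.1 - m * 2
  if remain ≤ 0 then b
  else
    match b with
    | [] => [(remain, p.2.2)]
    | (pre_cnt, pre_c) :: rest =>
        if p.2.2 ≠ pre_c then (remain, p.2.2) :: (pre_cnt, pre_c) :: rest
        else (pre_cnt + remain, p.2.2) :: rest

def process (a : List (Int × String)) : (List (Int × String)) × Int :=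
  let n : Int := a.length
  match (PySem.List.enumerate a 0).foldl (aMinStep n) none with
  | none => ([], 0)  -- unreachable under Pre_process (min_ stays inf only for a = [])
  | some m => (((PySem.List.enumerate a 0).foldl (aStep n m) []).reverse, m)

-- ===== PORT B =====
-- value contributed to min() by one enumerated element
def bVal (n : Int) (p : Int × (Int × String)) : Int :=
  if p.1 = 0 ∨ p.1 = n - 1 then p.2.1 else PySem.Int.floordiv (p.2.1 + 1) 2

-- one element of B's remainder generator
def bRemain (n m : Int) (p : Int × (Int × String)) : Int × String :=
  (if p.1 = 0 ∨ p.1 = n - 1 then p.2.1 - m else p.2.1 - m * 2, p.2.2)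

-- B's prefix-sum loop (pre = [0]; s = 0; for r, _ in pos: s += r; pre.append(s))
def preSums (s : Int) : List (Int × String) → List Int
  | [] => [s]
  | p :: t => s :: preSums (s + p.1) t

-- the boundary test of B's 'starts' comprehension
def isStart (pos : List (Int × String)) (k : Nat) : Bool :=
  k == 0 || !((pos.getD (k - 1) (0, "")).2 == (pos.getD k (0, "")).2)

-- starts = [k for k in range(len(pos)) if k == 0 or pos[k-1][1] != pos[k][1]]
def startsOf (pos : List (Int × String)) : List Nat :=
  (List.range pos.length).filter (isStart pos)

-- one element of B's output comprehension: [pre[e] - pre[s], pos[s][1]]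
def groupEntry (pos : List (Int × String)) (pre : List Int) (se : Nat × Nat) : Int × String :=
  (pre.getD se.2 0 - pre.getD se.1 0, (pos.getD se.1 (0, "")).2)

def process_alt (a : List (Int × String)) : (List (Int × String)) × Int :=
  let n : Int := a.length
  let e := PySem.List.enumerate a 0
  let min_ : Int := (PySem.List.min? (e.map (bVal n)) (fun x => x)).getD 0
  let pos := (e.map (bRemain n min_)).filter (fun rc => decide (0 < rc.1))
  let pre := preSums 0 pos
  let starts := startsOf pos
  let ends := starts.drop 1 ++ [pos.length]
  ((starts.zip ends).map (groupEntry pos pre), min_)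

-- ===== PRECONDITION & SPEC =====
-- A raises AssertionError when len(a) < 2; Pre_ excludes exactly those inputs.
def Pre_process (a : List (Int × String)) : Prop := 2 ≤ a.length
instance (a : List (Int × String)) : Decidable (Pre_process a) := by unfold Pre_process; infer_instance
def pvWitness_process : (List (Int × String)) := [(3, "a"), (4, "b")]
def Spec_process (a : List (Int × String)) (out : (List (Int × String)) × Int) : Prop := out = process_alt a
instance (a : List (Int × String)) (out : (List (Int × String)) × Int) : Decidable (Spec_process a out) := by unfold Spec_process; infer_instance

-- ===== CLAIM (what is proved, stated in full; the proofs are below) =====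
def Claim_equal_process : Prop := ∀ (a : List (Int × String)), Dom_process a → Pre_process a → Spec_process a (process a)

-- ===== LEMMAS AND PROOFS =====

-- merge step in the reversed-accumulator world (A's inner merge, filter stripped away)
def mstep (b : List (Int × String)) (x : Int × String) : List (Int × String) :=
  match b with
  | [] => [x]
  | (pc, cc) :: rest => if x.2 ≠ cc then x :: (pc, cc) :: rest else (pc + x.1, x.2) :: rest

-- front-merge (foldr) reformulation of run merging
def fm (x : Int × String) (M : List (Int × String)) : List (Int × String) :=
  match M with
  | [] => [x]
  | (r2, c2) :: t2 => if c2 = x.2 then (x.1 + r2, x.2) :: t2 else x :: (r2, c2) :: t2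

def mr (l : List (Int × String)) : List (Int × String) := l.foldr fm []

-- B's staged output, as one function of the filtered remainder list
def groupOut (pos : List (Int × String)) : List (Int × String) :=
  ((startsOf pos).zip ((startsOf pos).drop 1 ++ [pos.length])).map
    (groupEntry pos (preSums 0 pos))

-- pushing an adjacent-distinct merged list onto a reversed accumulator
def pushRev (l acc : List (Int × String)) : List (Int × String) :=
  match l, acc with
  | [], _ => acc
  | l, [] => l.reverse
  | (r, c) :: t, (pc, cc) :: ar =>
      if c = cc then t.reverse ++ (pc + r, c) :: ar
      else ((r, c) :: t).reverse ++ (pc, cc) :: ar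

theorem minfold (l : List (Int × (Int × String))) (n : Int) (v : Int) :
    l.foldl (aMinStep n) (some v) = some ((l.map (bVal n)).foldl min v) := by
  induction l generalizing v with
  | nil => simp
  | cons p t ih =>
      have h : aMinStep n (some v) p = some (min v (bVal n p)) := by
        simp only [aMinStep, pyMinA, bVal]; split_ifs <;> rfl
      simp only [List.foldl_cons, List.map_cons, h, ih]

theorem fuse (l : List (Int × (Int × String))) (n m : Int)
    (acc : List (Int × String)) :
    l.foldl (aStep n m) acc
      = ((l.map (bRemain n m)).filter (fun rc => decide (0 < rc.1))).foldl mstep acc := by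
  induction l generalizing acc with
  | nil => rfl
  | cons p t ih =>
      have hstep : aStep n m acc p
          = if 0 < (bRemain n m p).1 then mstep acc (bRemain n m p) else acc := by
        simp only [aStep, mstep, bRemain]
        by_cases h : (if p.1 = 0 ∨ p.1 = n - 1 then p.2.1 - m else p.2.1 - m * 2) ≤ 0 <;>
          simp [h]
      by_cases h : 0 < (bRemain n m p).1 <;>
        simp [h, hstep, ih]

theorem mr_cons_snd (x : Int × String) (t : List (Int × String)) :
    ∃ r rest, mr (x :: t) = (r, x.2) :: rest := by
  show ∃ r rest, fm x (t.foldr fm []) = (r, x.2) :: rest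
  cases h : t.foldr fm [] with
  | nil => exact ⟨x.1, [], by simp [fm]⟩
  | cons y ys =>
      obtain ⟨r2, c2⟩ := y
      by_cases hc : c2 = x.2
      · exact ⟨x.1 + r2, ys, by simp [fm, hc]⟩
      · exact ⟨x.1, (r2, c2) :: ys, by simp [fm, hc]⟩

theorem mr_span (c : String) (r : Int) (t : List (Int × String)) :
    mr ((r, c) :: t)
      = (r + ((t.takeWhile (fun y => y.2 == c)).map Prod.fst).sum, c)
          :: mr (t.dropWhile (fun y => y.2 == c)) := by
  induction t generalizing r with
  | nil => simp [mr, fm]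
  | cons y t2 ih =>
      obtain ⟨r2, c2⟩ := y
      by_cases hc : c2 = c
      · subst hc
        have h1 : mr ((r, c2) :: (r2, c2) :: t2) = fm (r, c2) (mr ((r2, c2) :: t2)) := rfl
        rw [h1, ih r2]
        simp [fm]
      · have h1 : mr ((r, c) :: (r2, c2) :: t2) = fm (r, c) (mr ((r2, c2) :: t2)) := rfl
        obtain ⟨ρ, rest, hmr⟩ := mr_cons_snd (r2, c2) t2
        rw [h1, hmr]
        simp [fm, hc, ← hmr]

theorem push (l acc : List (Int × String)) :
    l.foldl mstep acc = pushRev (mr l) acc := by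
  induction l generalizing acc with
  | nil => rfl
  | cons x t ih =>
      obtain ⟨r, c⟩ := x
      rw [List.foldl_cons, ih]
      show pushRev (mr t) (mstep acc (r, c)) = pushRev (mr ((r, c) :: t)) acc
      have hmr : mr ((r, c) :: t) = fm (r, c) (mr t) := rfl
      rw [hmr]
      cases hM : mr t with
      | nil =>
          cases acc with
          | nil => rfl
          | cons b ar =>
              obtain ⟨pc, cc⟩ := b
              by_cases hc : c = cc <;> simp [fm, mstep, pushRev, hc]
      | cons y t2 =>
          obtain ⟨r2, c2⟩ := y
          by_cases hc2 : c2 = c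
          · subst hc2
            cases acc with
            | nil => simp [fm, mstep, pushRev]
            | cons b ar =>
                obtain ⟨pc, cc⟩ := b
                by_cases hc : c2 = cc
                · subst hc; simp [fm, mstep, pushRev, add_assoc]
                · simp [fm, mstep, pushRev, hc]
          · cases acc with
            | nil => simp [fm, mstep, pushRev, hc2]
            | cons b ar =>
                obtain ⟨pc, cc⟩ := b
                by_cases hc : c = cc
                · subst hc; simp [fm, mstep, pushRev, hc2]
                · simp [fm, mstep, pushRev, hc, hc2]

theorem pushRev_nil (l : List (Int × String)) : pushRev l [] = l.reverse := by
  cases l with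
  | nil => rfl
  | cons x t => obtain ⟨r, c⟩ := x; rfl

-- ---- B-side: the prefix-sum / boundary-index construction equals run merging ----

theorem preSums_getD (pos : List (Int × String)) (s : Int) (k : Nat) (hk : k ≤ pos.length) :
    (preSums s pos).getD k 0 = s + ((pos.take k).map Prod.fst).sum := by
  induction pos generalizing s k with
  | nil =>
      have : k = 0 := by simpa using hk
      subst this; simp [preSums]
  | cons p t ih =>
      cases k with
      | zero => simp [preSums]
      | succ k =>
          have hk' : k ≤ t.length := by simpa using hk
          simp only [preSums, List.getD_cons_succ, List.take_succ_cons, List.map_cons,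
            List.sum_cons, ih (s + p.1) k hk']
          ring

theorem snd_getD_of_all {c : String} {l : List (Int × String)}
    (h : ∀ x ∈ l, x.2 = c) {j : Nat} (hj : j < l.length) (d : Int × String) :
    (l.getD j d).2 = c := by
  rw [List.getD_eq_getElem l d hj]
  exact h _ (List.getElem_mem hj)

theorem head_dropWhile_false {α : Type} (p : α → Bool) (l : List α) {y : α} {ys : List α}
    (h : l.dropWhile p = y :: ys) : p y = false := by
  induction l with
  | nil => simp at h
  | cons x t ih =>
      by_cases hx : p x
      · rw [List.dropWhile_cons_of_pos hx] at h; exact ih h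
      · rw [List.dropWhile_cons_of_neg hx] at h
        cases h; simpa using hx

theorem startsOf_head {pos : List (Int × String)} (h : pos ≠ []) :
    ∃ ss, startsOf pos = 0 :: ss := by
  obtain ⟨m, hm⟩ : ∃ m, pos.length = m + 1 := by
    cases pos with
    | nil => exact absurd rfl h
    | cons x t => exact ⟨t.length, rfl⟩
  refine ⟨((List.range m).map Nat.succ).filter (isStart pos), ?_⟩
  rw [startsOf, hm, List.range_succ_eq_map, List.filter_cons]
  simp [isStart]

theorem groupOut_eq_mr_aux : ∀ (n : Nat) (pos : List (Int × String)), pos.length ≤ n →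
    groupOut pos = mr pos := by
  intro n
  induction n with
  | zero =>
      intro pos hlen
      have : pos = [] := List.length_eq_zero_iff.mp (Nat.le_zero.mp hlen)
      subst this; rfl
  | succ n ih =>
      intro pos hlen
      cases pos with
      | nil => rfl
      | cons x t =>
          obtain ⟨r, c⟩ := x
          set w := t.takeWhile (fun y => y.2 == c) with hw
          set d := t.dropWhile (fun y => y.2 == c) with hd
          have htwd : w ++ d = t := List.takeWhile_append_dropWhile
          have hpos : (r, c) :: t = ((r, c) :: w) ++ d := by
            simp [← htwd]
          set L := w.length + 1 with hL
          have hrun : ∀ x ∈ (r, c) :: w, x.2 = c := by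
            intro x hx
            rcases List.mem_cons.mp hx with h | h
            · subst h; rfl
            · simpa using List.mem_takeWhile_imp h
          have hlenpos : ((r, c) :: t).length = L + d.length := by
            simp [hpos, hL]; omega
          have hdlen : d.length ≤ n := by
            have h1 : d.length ≤ t.length := List.length_dropWhile_le _ _
            have h2 : t.length ≤ n := by simpa using hlen
            omega
          -- lookups inside the run
          have hgetRun : ∀ j, j < L → (((r, c) :: t).getD j (0, "")).2 = c := by
            intro j hj
            rw [hpos, List.getD_append _ _ _ _ (by simpa [hL] using hj)]
            exact snd_getD_of_all hrun (by simpa [hL] using hj) _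
          -- lookups inside d
          have hgetD : ∀ j, ((r, c) :: t).getD (L + j) (0, "") = d.getD j (0, "") := by
            intro j
            rw [hpos, List.getD_append_right _ _ _ _ (by simp [hL])]
            congr 1
            simp [hL]
          -- the boundary-index list decomposes along the run
          have hstarts : startsOf ((r, c) :: t)
              = 0 :: (startsOf d).map (fun k => L + k) := by
            rw [startsOf, hlenpos, List.range_add, List.filter_append]
            have h1 : (List.range L).filter (isStart ((r, c) :: t)) = [0] := by
              rw [hL, List.range_succ_eq_map, List.filter_cons]
              have h0 : isStart ((r, c) :: t) 0 = true := by simp [isStart]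
              rw [if_pos h0]
              have h2 : ((List.range w.length).map Nat.succ).filter
                  (isStart ((r, c) :: t)) = [] := by
                rw [List.filter_eq_nil_iff]
                intro a ha
                obtain ⟨j, hj, rfl⟩ := List.mem_map.mp ha
                have hj' : j < w.length := List.mem_range.mp hj
                have e1 := hgetRun j (by omega)
                have e2 := hgetRun (j + 1) (by omega)
                have hfalse : isStart ((r, c) :: t) (j + 1) = false := by
                  simp only [isStart, Nat.add_sub_cancel]
                  rw [e1, e2]
                  simp
                simp [Nat.succ_eq_add_one, hfalse]
              rw [h2]
            have h2 : ((List.range d.length).map (fun k => L + k)).filter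
                (isStart ((r, c) :: t))
                = ((List.range d.length).filter (isStart d)).map (fun k => L + k) := by
              rw [List.filter_map]
              congr 1
              apply List.filter_congr
              intro j hj
              have hjd : j < d.length := List.mem_range.mp hj
              show isStart ((r, c) :: t) (L + j) = isStart d j
              cases j with
              | zero =>
                  obtain ⟨y, ys, hy⟩ : ∃ y ys, d = y :: ys := by
                    cases hdc : d with
                    | nil => rw [hdc] at hjd; simp at hjd
                    | cons y ys => exact ⟨y, ys, rfl⟩
                  have hyc : (y.2 == c) = false := head_dropWhile_false _ t (hd ▸ hy)
                  have e1 : (((r, c) :: t).getD (L + 0 - 1) (0, "")).2 = c :=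
                    hgetRun (L + 0 - 1) (by omega)
                  have e2 : ((r, c) :: t).getD (L + 0) (0, "") = y := by
                    rw [hgetD 0, hy]; rfl
                  have hcy : (c == y.2) = false :=
                    beq_eq_false_iff_ne.mpr (Ne.symm (beq_eq_false_iff_ne.mp hyc))
                  have eA : isStart ((r, c) :: t) (L + 0) = true := by
                    simp only [isStart]
                    rw [e2, e1, hcy]
                    simp
                  have eB : isStart d 0 = true := by simp [isStart]
                  rw [eA, eB]
              | succ jj =>
                  have e1 : L + (jj + 1) - 1 = L + jj := by omega
                  have eA : isStart ((r, c) :: t) (L + (jj + 1))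
                      = !((d.getD jj (0, "")).2 == (d.getD (jj + 1) (0, "")).2) := by
                    simp only [isStart, e1, hgetD jj, hgetD (jj + 1)]
                    have hne : (L + (jj + 1) == 0) = false := by simp [hL]
                    rw [hne]
                    simp
                  have eB : isStart d (jj + 1)
                      = !((d.getD jj (0, "")).2 == (d.getD (jj + 1) (0, "")).2) := by
                    simp only [isStart, Nat.add_sub_cancel]
                    simp
                  rw [eA, eB]
            rw [h1, h2, startsOf]
            rfl
          -- prefix-sum lookups split at the run boundary
          have hlen' : ((r, c) :: t).length = L + d.length := hlenpos
          have hpre : ∀ k, k ≤ d.length →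
              (preSums 0 ((r, c) :: t)).getD (L + k) 0
                = (r + (w.map Prod.fst).sum) + (preSums 0 d).getD k 0 := by
            intro k hk
            rw [preSums_getD _ _ _ (by omega), preSums_getD _ _ _ hk, hpos]
            rw [List.take_append (l₁ := (r, c) :: w)]
            have hrl : ((r, c) :: w).length = L := by simp [hL]
            have h1 : ((r, c) :: w).take (L + k) = (r, c) :: w :=
              List.take_of_length_le (by omega)
            rw [h1]
            simp [hrl]
            ring
          have hpre0 : (preSums 0 ((r, c) :: t)).getD 0 0 = 0 := by
            rw [preSums_getD _ _ _ (by omega)]; simp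
          have hpreL : (preSums 0 ((r, c) :: t)).getD L 0 = r + (w.map Prod.fst).sum := by
            have := hpre 0 (by omega)
            rw [preSums_getD d 0 0 (by omega)] at this
            simpa using this
          have hget0 : ((r, c) :: t).getD 0 (0, "") = (r, c) := rfl
          -- the run total, shared by both presentations
          have hspan := mr_span c r t
          rw [← hw, ← hd] at hspan
          -- bound for members of startsOf d
          have hmemS : ∀ s ∈ startsOf d, s < d.length := by
            intro s hs
            exact List.mem_range.mp (List.mem_of_mem_filter hs)
          by_cases hdnil : d = []
          · have hS : startsOf d = [] := by rw [hdnil]; rfl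
            rw [groupOut, hstarts, hS]
            simp only [List.map_nil, List.drop_succ_cons, List.drop_nil, List.nil_append,
              List.zip_cons_cons, List.zip_nil_right, List.map_cons, List.map_nil]
            rw [hspan, hdnil]
            have hlenL : ((r, c) :: t).length = L := by rw [hlen', hdnil]; simp
            simp only [groupEntry, hlenL, hpreL, hpre0, hget0, mr]
            simp
          · obtain ⟨ss, hss⟩ := startsOf_head (pos := d) hdnil
            -- tail entries: shift by L and use the induction hypothesis on d
            have htail :
                (((startsOf d).map (fun k => L + k)).zip
                    (((startsOf d).map (fun k => L + k)).drop 1 ++ [((r, c) :: t).length])).map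
                  (groupEntry ((r, c) :: t) (preSums 0 ((r, c) :: t)))
                = groupOut d := by
              have hzip :
                  ((startsOf d).map (fun k => L + k)).zip
                      (((startsOf d).map (fun k => L + k)).drop 1 ++ [((r, c) :: t).length])
                    = ((startsOf d).zip ((startsOf d).drop 1 ++ [d.length])).map
                        (Prod.map (fun k => L + k) (fun k => L + k)) := by
                rw [hlen']
                have : ((startsOf d).map (fun k => L + k)).drop 1 ++ [L + d.length]
                    = ((startsOf d).drop 1 ++ [d.length]).map (fun k => L + k) := by
                  simp [List.map_append]
                rw [this, List.zip_map]
              rw [hzip, List.map_map, groupOut]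
              apply List.map_congr_left
              intro se hse
              obtain ⟨hse1, hse2⟩ := List.of_mem_zip (a := se.1) (b := se.2) (by simpa using hse)
              have hs1 : se.1 < d.length := hmemS _ hse1
              have hs2 : se.2 ≤ d.length := by
                rcases List.mem_append.mp hse2 with h | h
                · exact Nat.le_of_lt (hmemS _ ((List.tail_sublist _).subset h))
                · simp at h; omega
              simp only [Function.comp_apply, Prod.map, groupEntry]
              rw [hpre _ (Nat.le_of_lt hs1), hpre _ hs2, hgetD]
              ring_nf
            rw [groupOut, hstarts, hss]
            simp only [List.map_cons, List.drop_succ_cons, List.drop_zero]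
            have hcons :
                (0 :: (L + 0) :: (ss.map (fun k => L + k))).zip
                    (((L + 0) :: ss.map (fun k => L + k)) ++ [((r, c) :: t).length])
                  = (0, L + 0) :: (((L + 0) :: ss.map (fun k => L + k)).zip
                      ((ss.map (fun k => L + k)) ++ [((r, c) :: t).length])) := by
              rfl
            rw [hcons, List.map_cons]
            have hhead : groupEntry ((r, c) :: t) (preSums 0 ((r, c) :: t)) (0, L + 0)
                = (r + (w.map Prod.fst).sum, c) := by
              simp only [groupEntry, Nat.add_zero, hpreL, hpre0, hget0]
              simp
            have htail' := htail
            rw [hss] at htail'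
            simp only [List.map_cons, List.drop_succ_cons, List.drop_zero] at htail'
            rw [hhead, htail', ih d hdlen, hspan]
theorem groupOut_eq_mr (pos : List (Int × String)) : groupOut pos = mr pos :=
  groupOut_eq_mr_aux pos.length pos (Nat.le_refl _)

-- ===== VERDICT (by name: the statement is the Claim_ definition above) =====
theorem process_spec : Claim_equal_process := by
  intro a _ hpre
  unfold Spec_process
  match a, hpre with
  | x :: t, _ =>
    obtain ⟨cnt, c⟩ := x
    set n : Int := ((((cnt, c) :: t : List (Int × String)).length : Nat) : Int) with hn
    have he : PySem.List.enumerate ((cnt, c) :: t) 0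
        = (0, (cnt, c)) :: PySem.List.enumerate t 1 := by
      simp [PySem.List.enumerate_cons]
    have hstep0 : aMinStep n none (0, (cnt, c)) = some (bVal n (0, (cnt, c))) := by
      simp only [aMinStep, pyMinA, bVal]; split_ifs <;> rfl
    have hmin :
        (PySem.List.enumerate ((cnt, c) :: t) 0).foldl (aMinStep n) none
          = some (((PySem.List.enumerate t 1).map (bVal n)).foldl min (bVal n (0, (cnt, c)))) := by
      rw [he, List.foldl_cons, hstep0, minfold]
    have hminB :
        (PySem.List.min? ((PySem.List.enumerate ((cnt, c) :: t) 0).map (bVal n)) (fun x => x)).getD 0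
          = ((PySem.List.enumerate t 1).map (bVal n)).foldl min (bVal n (0, (cnt, c))) := by
      rw [he, List.map_cons, PySem.List.min?_id_cons, Option.getD_some]
    set m : Int := ((PySem.List.enumerate t 1).map (bVal n)).foldl min (bVal n (0, (cnt, c))) with hm
    show process ((cnt, c) :: t) = process_alt ((cnt, c) :: t)
    simp only [process, process_alt, ← hn, hmin, hminB]
    rw [fuse, push, pushRev_nil, List.reverse_reverse, ← groupOut_eq_mr]
    rfl
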